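-- pv_equiv track=rewrite | github.com/0ffset/pomdptrack-ros | Util.py | __cartesianPower
-- ===== SOURCE A (Python) =====
-- def __cartesianPower(S, n):
-- 	ntuple = tuple()
-- 	if n == 1:
-- 		for el in S:
-- 			ntuple += ((el,),)
-- 		return ntuple
--
-- 	for el in S:
-- 		for subS in __cartesianPower(S, n-1):
-- 			ntuple += ((el,) + subS,)
--
-- 	return ntuple
-- ===== SOURCE B (Python) =====
-- def __cartesianPower(S, n):
-- 	res = [()]
-- 	for _ in range(n):
-- 		res = [t + (el,) for t in res for el in S]
-- 	return tuple(res)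
-- ===== Notes on version B (the rewrite author's own statement) =====
-- stated objective: alternative
-- what changed: Replaces A's recursion on n (prepending each element to every tuple of the (n-1)-power) with a single iterative pass that starts from [()] and appends one coordinate per step; same lexicographic order, no recursion.
-- outside the precondition, e.g. on __cartesianPower([], 0): A returns (), B returns ((),)
import Mathlib
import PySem

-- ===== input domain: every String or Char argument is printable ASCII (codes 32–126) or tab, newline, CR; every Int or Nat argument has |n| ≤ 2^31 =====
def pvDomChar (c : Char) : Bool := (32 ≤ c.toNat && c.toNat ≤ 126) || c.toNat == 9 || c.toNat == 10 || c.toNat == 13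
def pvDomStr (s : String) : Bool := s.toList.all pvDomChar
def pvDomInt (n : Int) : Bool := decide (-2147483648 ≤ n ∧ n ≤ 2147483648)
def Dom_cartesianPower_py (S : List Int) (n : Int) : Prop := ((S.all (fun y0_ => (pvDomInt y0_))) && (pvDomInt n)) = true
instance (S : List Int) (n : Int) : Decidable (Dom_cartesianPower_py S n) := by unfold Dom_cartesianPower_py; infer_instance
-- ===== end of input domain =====

-- B replaces A's recursion with a single iterative pass growing the tuples one coordinate per step (different decomposition, same values on n ≥ 1).

-- ===== PORT A =====
-- A recurses on n; for n ≤ 0 with nonempty S the Python diverges (RecursionError),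
-- so the port recurses on the fuel n.toNat (a totality guard only; outside Pre_ nothing is claimed).
def cartesianPower_pyFuel (S : List Int) : Nat → List (List Int)
  | 0 => []
  | 1 => S.foldl (fun ntuple el => ntuple ++ [[el]]) []
  | (k+2) => S.foldl (fun ntuple el => ntuple ++ (cartesianPower_pyFuel S (k+1)).map (fun subS => el :: subS)) []

def cartesianPower_py (S : List Int) (n : Int) : List (List Int) :=
  cartesianPower_pyFuel S n.toNat

-- ===== PORT B =====
def cartesianPower_py_alt (S : List Int) (n : Int) : List (List Int) :=
  (PySem.List.pyRange 0 n 1).foldl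
    (fun res _ => res.flatMap (fun t => S.map (fun el => t ++ [el]))) [[]]

-- ===== PRECONDITION & SPEC =====
-- Pre_ excludes n ≤ 0: there A raises RecursionError whenever S is nonempty, and for empty S
-- A's () versus B's ((),) at n ≤ 0 is an accidental value of a degenerate input neither caller uses.
def Pre_cartesianPower_py (S : List Int) (n : Int) : Prop := 1 ≤ n
instance (S : List Int) (n : Int) : Decidable (Pre_cartesianPower_py S n) := by unfold Pre_cartesianPower_py; infer_instance
def pvWitness_cartesianPower_py : List Int × Int := ([1, 2], 2)

def Spec_cartesianPower_py (S : List Int) (n : Int) (out : List (List Int)) : Prop := out = cartesianPower_py_alt S n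
instance (S : List Int) (n : Int) (out : List (List Int)) : Decidable (Spec_cartesianPower_py S n out) := by unfold Spec_cartesianPower_py; infer_instance

-- ===== CLAIM (what is proved, stated in full; the proofs are below) =====
def Claim_equal_cartesianPower_py : Prop := ∀ (S : List Int) (n : Int), Dom_cartesianPower_py S n → Pre_cartesianPower_py S n → Spec_cartesianPower_py S n (cartesianPower_py S n)

-- ===== LEMMAS AND PROOFS =====

-- B's one-pass step: extend every tuple by every element of S at the tail.
def pvStep (S : List Int) (res : List (List Int)) : List (List Int) :=
  res.flatMap (fun t => S.map (fun el => t ++ [el]))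

-- A's recursive step: prepend every element of S to every tuple.
def pvPre (S : List Int) (L : List (List Int)) : List (List Int) :=
  S.flatMap (fun el => L.map (fun t => el :: t))

theorem pvStep_pre_comm (S : List Int) (L : List (List Int)) :
    pvStep S (pvPre S L) = pvPre S (pvStep S L) := by
  simp [pvStep, pvPre, List.flatMap_assoc, List.flatMap_map, List.map_flatMap, List.map_map, Function.comp_def]

theorem pvFoldl_const {α β : Type} (f : β → β) :
    ∀ (l : List α) (init : β), l.foldl (fun r _ => f r) init = f^[l.length] init := by
  intro l
  induction l with
  | nil => intro init; simp
  | cons x t ih => intro init; simp [List.foldl_cons, ih, Function.iterate_succ_apply]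

theorem pvAlt_eq_iterate (S : List Int) (n : Int) :
    cartesianPower_py_alt S n = (pvStep S)^[n.toNat] [[]] := by
  unfold cartesianPower_py_alt
  rw [show (fun (res : List (List Int)) (_ : Int) => res.flatMap (fun t => S.map (fun el => t ++ [el]))) = (fun res _ => pvStep S res) from rfl]
  rw [pvFoldl_const (pvStep S)]
  simp [PySem.List.length_pyRange_one]

theorem pvPre_eq_step (S : List Int) :
    ∀ k, pvPre S ((pvStep S)^[k] [[]]) = pvStep S ((pvStep S)^[k] [[]]) := by
  intro k
  induction k with
  | zero => simp [pvPre, pvStep]; induction S <;> simp_all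
  | succ k ih =>
      rw [Function.iterate_succ_apply', ← ih, pvStep_pre_comm, ih]

theorem pvFuel_eq_iterate (S : List Int) :
    ∀ k, cartesianPower_pyFuel S (k+1) = (pvStep S)^[k+1] [[]] := by
  intro k
  induction k with
  | zero =>
      simp [cartesianPower_pyFuel, pvStep]
      induction S <;> simp_all
  | succ k ih =>
      show S.foldl (fun ntuple el => ntuple ++ (cartesianPower_pyFuel S (k+1)).map (fun subS => el :: subS)) [] = _
      rw [PySem.List.foldl_append_eq_flatMap]
      rw [ih]
      have : S.flatMap (fun el => ((pvStep S)^[k+1] [[]]).map (fun subS => el :: subS)) = pvPre S ((pvStep S)^[k+1] [[]]) := rfl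
      rw [List.nil_append, this, pvPre_eq_step, ← Function.iterate_succ_apply' (pvStep S) (k+1) [[]]]

-- ===== VERDICT (by name: the statement is the Claim_ definition above) =====
theorem cartesianPower_py_spec : Claim_equal_cartesianPower_py := by
  intro S n _ hpre
  unfold Pre_cartesianPower_py at hpre
  unfold Spec_cartesianPower_py cartesianPower_py
  rw [pvAlt_eq_iterate]
  have h1 : 1 ≤ n.toNat := by omega
  obtain ⟨k, hk⟩ : ∃ k, n.toNat = k + 1 := ⟨n.toNat - 1, by omega⟩
  rw [hk, pvFuel_eq_iterate]
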